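-- pv_equiv track=rewrite | github.com/alxwen711/contestSubmissionArchive | codeforces/live contests/2023-2/875/c.py | fermat_array
-- ===== SOURCE A (Python) =====
-- def fermat_array(n: int, k: int, r: int) -> list[list[int],list[int]]:
--     if k >= r or r < 3: return None, None
--     arLen = max(n,k)+3 #array length
--     factorials = [0]*arLen
--     inverses = [0]*arLen
--     factorials[0], inverses[0] = 1,1
--     for i in range(1,arLen):
--         factorials[i] = factorials[i-1]*i % r
--         inverses[i] = pow(factorials[i],r-2,r)
--     return factorials, inverses
-- ===== SOURCE B (Python) =====
-- def fermat_array(n: int, k: int, r: int) -> list[list[int],list[int]]: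
--     if k >= r or r < 3: return None, None
--     arLen = max(n,k)+3
--     e = r - 2
--     # spf[i]: a prime divisor of i (spf[p] == p exactly when p is prime)
--     spf = [0]*arLen
--     for p in range(2, arLen):
--         if spf[p] == 0:
--             for m in range(p, arLen, p):
--                 if spf[m] == 0:
--                     spf[m] = p
--     # ipow[i] = pow(i, e, r); i**e is completely multiplicative in i, so only
--     # primes need an actual modular exponentiation
--     ipow = [0]*arLen
--     if arLen > 1:
--         ipow[1] = 1
--     for i in range(2, arLen):
--         d = spf[i]
--         ipow[i] = pow(i, e, r) if d == i else ipow[d] * ipow[i // d] % r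
--     factorials = [1]
--     inverses = [1]
--     f = g = 1
--     for i in range(1, arLen):
--         f = f * i % r
--         g = g * ipow[i] % r
--         factorials.append(f)
--         inverses.append(g)
--     return factorials, inverses
-- ===== Notes on version B (the rewrite author's own statement) =====
-- stated objective: alternative
-- what changed: A calls pow(factorials[i], r-2, r) afresh for every index; B sieves a prime divisor per index, performs a real modular exponentiation only for primes (i**(r-2) mod r is completely multiplicative in i) and builds each inverse by multiplying a running product, producing identical values with one pow per prime instead of one per index.
import Mathlib
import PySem

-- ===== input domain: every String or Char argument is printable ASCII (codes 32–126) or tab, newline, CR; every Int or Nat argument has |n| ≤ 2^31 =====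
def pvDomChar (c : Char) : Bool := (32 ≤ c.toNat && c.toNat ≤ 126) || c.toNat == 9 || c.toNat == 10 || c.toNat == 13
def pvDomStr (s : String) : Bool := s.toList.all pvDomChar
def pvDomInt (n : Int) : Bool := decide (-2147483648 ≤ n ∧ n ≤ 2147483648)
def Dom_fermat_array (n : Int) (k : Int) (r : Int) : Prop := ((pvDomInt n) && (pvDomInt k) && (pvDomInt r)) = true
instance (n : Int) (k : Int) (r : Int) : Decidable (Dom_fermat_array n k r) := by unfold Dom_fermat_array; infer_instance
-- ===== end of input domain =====

-- B replaces A's per-index modular exponentiation pow(factorials[i], r-2, r) by a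
-- sieve-driven table of pow(i, r-2, r) (one real pow per prime, modular products
-- elsewhere) and a running product for the inverses; exactly the same values.

-- shared port helper: Python's three-argument pow(b, e, m) (CPython: binary
-- exponentiation); proven equal to PySem.Int.powMod for m > 0 in pvPowMod_eq_powMod below
def pvPowMod (b : Int) (e : Nat) (m : Int) : Int :=
  if _h : e = 0 then PySem.Int.mod 1 m
  else
    let x := pvPowMod b (e / 2) m
    if e % 2 = 0 then PySem.Int.mod (x * x) m
    else PySem.Int.mod (PySem.Int.mod (x * x) m * b) m
decreasing_by exact Nat.div_lt_self (by omega) (by norm_num)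

-- ===== PORT A =====
def fermat_array (n : Int) (k : Int) (r : Int) : Option (List Int) × Option (List Int) :=
  if k ≥ r ∨ r < 3 then (none, none)
  else
    let arLen : Int := max n k + 3
    let factorials : List Int := List.replicate arLen.toNat 0
    let inverses : List Int := List.replicate arLen.toNat 0
    let factorials := PySem.List.pySetD factorials 0 1
    let inverses := PySem.List.pySetD inverses 0 1
    let st := (PySem.List.pyRange 1 arLen 1).foldl (fun (st : List Int × List Int) i =>
        let f := PySem.Int.mod (PySem.List.pyGetD st.1 (i - 1) 0 * i) r
        (PySem.List.pySetD st.1 i f,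
         PySem.List.pySetD st.2 i (pvPowMod f (r - 2).toNat r))) (factorials, inverses)
    (some st.1, some st.2)

-- ===== PORT B =====
def fermat_array_alt (n : Int) (k : Int) (r : Int) : Option (List Int) × Option (List Int) :=
  if k ≥ r ∨ r < 3 then (none, none)
  else
    let arLen : Int := max n k + 3
    let e : Int := r - 2
    let spf : List Int := List.replicate arLen.toNat 0
    let spf := (PySem.List.pyRange 2 arLen 1).foldl (fun spf p =>
        if PySem.List.pyGetD spf p 0 = 0 then
          (PySem.List.pyRange p arLen p).foldl (fun spf m =>
              if PySem.List.pyGetD spf m 0 = 0 then PySem.List.pySetD spf m p else spf) spf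
        else spf) spf
    let ipow : List Int := List.replicate arLen.toNat 0
    let ipow := if arLen > 1 then PySem.List.pySetD ipow 1 1 else ipow
    let ipow := (PySem.List.pyRange 2 arLen 1).foldl (fun ipow i =>
        let d := PySem.List.pyGetD spf i 0
        PySem.List.pySetD ipow i
          (if d = i then pvPowMod i e.toNat r
           else PySem.Int.mod (PySem.List.pyGetD ipow d 0 *
                  PySem.List.pyGetD ipow (PySem.Int.floordiv i d) 0) r)) ipow
    let st := (PySem.List.pyRange 1 arLen 1).foldl
        (fun (st : (List Int × List Int) × Int × Int) i =>
          let f := PySem.Int.mod (st.2.1 * i) r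
          let g := PySem.Int.mod (st.2.2 * PySem.List.pyGetD ipow i 0) r
          ((st.1.1 ++ [f], st.1.2 ++ [g]), (f, g))) (([1], [1]), (1, 1))
    (some st.1.1, some st.1.2)

-- ===== PRECONDITION & SPEC =====
-- Pre_ excludes only the inputs where A raises IndexError: r ≥ 3, k < r and max(n,k) ≤ -3,
-- where factorials[0] = 1 hits an empty (or negative-length) preallocated list.
def Pre_fermat_array (n : Int) (k : Int) (r : Int) : Prop :=
  (k ≥ r ∨ r < 3) ∨ 1 ≤ max n k + 3
instance (n : Int) (k : Int) (r : Int) : Decidable (Pre_fermat_array n k r) := by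
  unfold Pre_fermat_array; infer_instance
def pvWitness_fermat_array : Int × Int × Int := (4, 2, 7)


def Spec_fermat_array (n : Int) (k : Int) (r : Int) (out : Option (List Int) × Option (List Int)) : Prop := out = fermat_array_alt n k r
instance (n : Int) (k : Int) (r : Int) (out : Option (List Int) × Option (List Int)) : Decidable (Spec_fermat_array n k r out) := by unfold Spec_fermat_array; infer_instance

-- ===== CLAIM (what is proved, stated in full; the proofs are below) =====
def Claim_equal_fermat_array : Prop := ∀ (n : Int) (k : Int) (r : Int), Dom_fermat_array n k r → Pre_fermat_array n k r → Spec_fermat_array n k r (fermat_array n k r)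

-- ===== LEMMAS AND PROOFS =====

def pvF (r : Int) : Nat → Int
  | 0 => 1
  | j + 1 => PySem.Int.mod (pvF r j * ((j : Int) + 1)) r

def pvIa (r : Int) : Nat → Int
  | 0 => 1
  | j + 1 => PySem.Int.powMod (pvF r (j + 1)) (r - 2).toNat r

def pvGb (r : Int) : Nat → Int
  | 0 => 1
  | j + 1 => PySem.Int.mod (pvGb r j * PySem.Int.mod (((j : Int) + 1) ^ (r - 2).toNat) r) r

lemma pv_mod_pos (a r : Int) (hr : 0 < r) : PySem.Int.mod a r = a % r := by
  simp [PySem.Int.mod, Int.fmod_eq_emod, le_of_lt hr]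

lemma pv_pow_emod (a : Int) (e : Nat) (n : Int) : a ^ e % n = (a % n) ^ e % n := by
  induction e with
  | zero => simp
  | succ e ih =>
      conv_lhs => rw [pow_succ, Int.mul_emod, ih]
      conv_rhs => rw [pow_succ, Int.mul_emod]
      rw [Int.emod_emod_of_dvd _ dvd_rfl]

lemma pvPowMod_eq_pow (b : Int) (e : Nat) (m : Int) (hm : 0 < m) : pvPowMod b e m = b ^ e % m := by
  induction e using Nat.strong_induction_on with
  | _ e ih =>
      rw [pvPowMod]
      split_ifs with h0 h2
      · subst h0; simp [pv_mod_pos _ _ hm]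
      · rw [pv_mod_pos _ _ hm, ih (e / 2) (Nat.div_lt_self (by omega) (by norm_num)),
          ← Int.mul_emod, ← pow_add, show e / 2 + e / 2 = e by omega]
      · rw [pv_mod_pos _ _ hm, pv_mod_pos _ _ hm,
          ih (e / 2) (Nat.div_lt_self (by omega) (by norm_num)),
          ← Int.mul_emod, ← pow_add, Int.mul_emod, Int.emod_emod_of_dvd _ dvd_rfl,
          ← Int.mul_emod, ← pow_succ, show e / 2 + e / 2 + 1 = e by omega]

lemma pvPowMod_eq_powMod (b : Int) (e : Nat) (m : Int) (hm : 0 < m) :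
    pvPowMod b e m = PySem.Int.powMod b e m := by
  rw [pvPowMod_eq_pow _ _ _ hm, PySem.Int.powMod, pv_mod_pos _ _ hm]

lemma pvGb_eq (r : Int) (hr : 3 ≤ r) : ∀ j, pvGb r j = pvF r j ^ (r - 2).toNat % r := by
  intro j
  induction j with
  | zero =>
      show (1 : Int) = (1 : Int) ^ (r - 2).toNat % r
      rw [one_pow, Int.emod_eq_of_lt (by norm_num) (by omega)]
  | succ j ih =>
      show PySem.Int.mod (pvGb r j * PySem.Int.mod (((j : Int) + 1) ^ (r - 2).toNat) r) r = _
      rw [pv_mod_pos _ _ (by omega), pv_mod_pos _ _ (by omega), ih, ← Int.mul_emod,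
        ← mul_pow, pv_pow_emod]
      show _ = pvF r (j + 1) ^ (r - 2).toNat % r
      rw [show pvF r (j + 1) = PySem.Int.mod (pvF r j * ((j : Int) + 1)) r from rfl,
        pv_mod_pos _ _ (by omega)]

lemma pvIa_eq_pvGb (r : Int) (hr : 3 ≤ r) : ∀ j, pvIa r j = pvGb r j := by
  intro j
  cases j with
  | zero => rfl
  | succ j =>
      show PySem.Int.powMod (pvF r (j + 1)) (r - 2).toNat r = _
      rw [pvGb_eq r hr, PySem.Int.powMod, pv_mod_pos _ _ (by omega)]

-- ----- A-side fold -----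

lemma pv_getD_part (g : Nat → Int) (t j : Nat) (rest : List Int) (hj : j < t) :
    ((List.range t).map g ++ rest).getD j 0 = g j := by
  rw [List.getD_eq_getElem?_getD, List.getElem?_append_left (by simpa using hj)]
  simp [hj]

lemma pv_set_part' (g : Nat → Int) (t L : Nat) (ht : t < L) :
    ((List.range t).map g ++ List.replicate (L - t) 0).set t (g t)
    = (List.range (t + 1)).map g ++ List.replicate (L - (t + 1)) 0 := by
  rw [List.set_append, if_neg (by simp)]
  have h1 : L - t = (L - (t + 1)) + 1 := by omega
  rw [h1, List.replicate_succ]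
  simp [List.range_succ]

lemma A_fold (r : Int) (hr : 3 ≤ r) (L : Nat) (hL : 1 ≤ L) : ∀ t, 1 ≤ t → t ≤ L →
    (PySem.List.pyRange 1 (t : Int) 1).foldl (fun (st : List Int × List Int) i =>
        let f := PySem.Int.mod (PySem.List.pyGetD st.1 (i - 1) 0 * i) r
        (PySem.List.pySetD st.1 i f,
         PySem.List.pySetD st.2 i (pvPowMod f (r - 2).toNat r)))
      (PySem.List.pySetD (List.replicate L 0) 0 1, PySem.List.pySetD (List.replicate L 0) 0 1)
    = ((List.range t).map (pvF r) ++ List.replicate (L - t) 0,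
       (List.range t).map (pvIa r) ++ List.replicate (L - t) 0) := by
  intro t
  induction t with
  | zero => omega
  | succ s ih =>
      intro _ hsL
      rcases Nat.eq_zero_or_pos s with hs | hs
      · subst hs
        rw [show ((1 : Nat) : Int) = 1 by norm_num, PySem.List.pyRange_one_eq_nil le_rfl]
        have hrep : List.replicate L (0 : Int) = 0 :: List.replicate (L - 1) 0 := by
          rw [show L = (L - 1) + 1 by omega, List.replicate_succ]; simp
        simp only [List.foldl_nil, PySem.List.pySetD_of_nonneg _ _ (by norm_num : (0:Int) ≤ 0)]
        rw [hrep]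
        simp [pvF, pvIa]
      · -- s ≥ 1
        have hcast : ((s + 1 : Nat) : Int) = (s : Int) + 1 := by push_cast; ring
        rw [hcast, PySem.List.pyRange_one_succ_right (by exact_mod_cast hs : (1:Int) ≤ (s:Int)),
          List.foldl_append, ih hs (by omega)]
        simp only [List.foldl_cons, List.foldl_nil]
        have hgetf : PySem.List.pyGetD ((List.range s).map (pvF r) ++ List.replicate (L - s) 0) ((s : Int) - 1) 0
            = pvF r (s - 1) := by
          rw [show (s : Int) - 1 = ((s - 1 : Nat) : Int) by omega,
            PySem.List.pyGetD_of_nonneg _ _ (by positivity)]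
          rw [Int.toNat_natCast]
          exact pv_getD_part _ _ _ _ (by omega)
        have hf : PySem.Int.mod (pvF r (s - 1) * (s : Int)) r = pvF r s := by
          conv_rhs => rw [show s = (s - 1) + 1 by omega]
          show _ = PySem.Int.mod (pvF r (s - 1) * (((s - 1 : Nat) : Int) + 1)) r
          congr 2
          omega
        have hIa : pvPowMod (pvF r s) (r - 2).toNat r = pvIa r s := by
          rw [pvPowMod_eq_powMod _ _ _ (by omega)]
          conv_rhs => rw [show s = (s - 1) + 1 by omega]
          show _ = PySem.Int.powMod (pvF r ((s - 1) + 1)) (r - 2).toNat r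
          congr 2
          omega
        simp only [hgetf, hf]
        rw [PySem.List.pySetD_of_nonneg _ _ (by positivity), PySem.List.pySetD_of_nonneg _ _ (by positivity),
          Int.toNat_natCast, hIa]
        rw [pv_set_part' (pvF r) s L (by omega), pv_set_part' (pvIa r) s L (by omega)]

-- ----- sieve -----
-- every nonzero entry of spf is a divisor d of its index with 2 ≤ d ≤ index

def pvGood (S : List Int) : Prop :=
  ∀ j : Nat, j < S.length → S.getD j 0 ≠ 0 →
    2 ≤ S.getD j 0 ∧ S.getD j 0 ∣ (j : Int) ∧ S.getD j 0 ≤ (j : Int)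

lemma pv_getD_set (S : List Int) (i j : Nat) (v : Int) :
    (S.set i v).getD j 0 = if i = j ∧ i < S.length then v else S.getD j 0 := by
  rw [List.getD_eq_getElem?_getD, List.getElem?_set, List.getD_eq_getElem?_getD]
  by_cases hij : i = j
  · subst hij
    by_cases hl : i < S.length
    · simp [hl]
    · simp [hl]
  · simp [hij]

lemma sieve_inner (p aL : Int) (hp : 2 ≤ p) : ∀ (l : List Int) (S : List Int),
    (∀ m ∈ l, p ∣ m ∧ p ≤ m ∧ m < aL) → pvGood S →
    pvGood (l.foldl (fun spf m =>
        if PySem.List.pyGetD spf m 0 = 0 then PySem.List.pySetD spf m p else spf) S) ∧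
    (l.foldl (fun spf m =>
        if PySem.List.pyGetD spf m 0 = 0 then PySem.List.pySetD spf m p else spf) S).length = S.length ∧
    (∀ j : Nat, S.getD j 0 ≠ 0 →
      (l.foldl (fun spf m =>
        if PySem.List.pyGetD spf m 0 = 0 then PySem.List.pySetD spf m p else spf) S).getD j 0 ≠ 0) ∧
    (∀ m ∈ l, m.toNat < S.length →
      (l.foldl (fun spf m =>
        if PySem.List.pyGetD spf m 0 = 0 then PySem.List.pySetD spf m p else spf) S).getD m.toNat 0 ≠ 0) := by
  intro l
  induction l with
  | nil => intro S _ hG; exact ⟨hG, rfl, fun j h => h, by simp⟩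
  | cons m l ih =>
      intro S hmem hG
      obtain ⟨hdvd, hpm, hma⟩ := hmem m (by simp)
      have hm0 : (0 : Int) ≤ m := by omega
      -- the one-step result
      set S1 : List Int := if PySem.List.pyGetD S m 0 = 0 then PySem.List.pySetD S m p else S with hS1
      have hlen1 : S1.length = S.length := by
        rw [hS1]; split_ifs <;> simp [PySem.List.length_pySetD]
      have hgetD1 : ∀ j : Nat, S1.getD j 0 = S.getD j 0 ∨
          (S1.getD j 0 = p ∧ (j : Int) = m ∧ j < S.length) := by
        intro j
        rw [hS1]
        split_ifs with h0
        · rw [PySem.List.pySetD_of_nonneg _ _ hm0, pv_getD_set]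
          split_ifs with hc
          · right; exact ⟨rfl, by omega, by omega⟩
          · left; rfl
        · left; rfl
      have hG1 : pvGood S1 := by
        intro j hj hnz
        rcases hgetD1 j with h | ⟨hv, hjm, _⟩
        · rw [h] at hnz ⊢; exact hG j (by omega) hnz
        · rw [hv]; exact ⟨hp, by rw [hjm]; exact hdvd, by omega⟩
      have hnz1 : ∀ j : Nat, S.getD j 0 ≠ 0 → S1.getD j 0 ≠ 0 := by
        intro j h
        rcases hgetD1 j with hh | ⟨hv, _, _⟩
        · rw [hh]; exact h
        · rw [hv]; omega
      have hself : m.toNat < S.length → S1.getD m.toNat 0 ≠ 0 := by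
        intro hlt
        rw [hS1]
        split_ifs with h0
        · rw [PySem.List.pySetD_of_nonneg _ _ hm0, pv_getD_set, if_pos ⟨rfl, hlt⟩]; omega
        · rw [PySem.List.pyGetD_of_nonneg _ _ hm0] at h0; exact h0
      obtain ⟨iG, ilen, inz, iself⟩ := ih S1 (fun x hx => hmem x (by simp [hx])) hG1
      refine ⟨by simpa [hS1] using iG, by simp only [List.foldl_cons, ← hS1]; omega, ?_, ?_⟩
      · intro j hj
        simpa [← hS1] using inz j (hnz1 j hj)
      · intro x hx hxlt
        simp only [List.foldl_cons, ← hS1]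
        rcases List.mem_cons.mp hx with rfl | hx'
        · exact inz x.toNat (hself hxlt)
        · exact iself x hx' (by omega)

lemma sieve_ok (L : Nat) :
    ((PySem.List.pyRange 2 (L : Int) 1).foldl (fun spf p =>
        if PySem.List.pyGetD spf p 0 = 0 then
          (PySem.List.pyRange p (L : Int) p).foldl (fun spf m =>
              if PySem.List.pyGetD spf m 0 = 0 then PySem.List.pySetD spf m p else spf) spf
        else spf) (List.replicate L 0)).length = L ∧
    ∀ j : Nat, 2 ≤ j → j < L →
      2 ≤ ((PySem.List.pyRange 2 (L : Int) 1).foldl (fun spf p =>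
        if PySem.List.pyGetD spf p 0 = 0 then
          (PySem.List.pyRange p (L : Int) p).foldl (fun spf m =>
              if PySem.List.pyGetD spf m 0 = 0 then PySem.List.pySetD spf m p else spf) spf
        else spf) (List.replicate L 0)).getD j 0 ∧
      ((PySem.List.pyRange 2 (L : Int) 1).foldl (fun spf p =>
        if PySem.List.pyGetD spf p 0 = 0 then
          (PySem.List.pyRange p (L : Int) p).foldl (fun spf m =>
              if PySem.List.pyGetD spf m 0 = 0 then PySem.List.pySetD spf m p else spf) spf
        else spf) (List.replicate L 0)).getD j 0 ∣ (j : Int) ∧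
      ((PySem.List.pyRange 2 (L : Int) 1).foldl (fun spf p =>
        if PySem.List.pyGetD spf p 0 = 0 then
          (PySem.List.pyRange p (L : Int) p).foldl (fun spf m =>
              if PySem.List.pyGetD spf m 0 = 0 then PySem.List.pySetD spf m p else spf) spf
        else spf) (List.replicate L 0)).getD j 0 ≤ (j : Int) := by
  have hG0 : pvGood (List.replicate L (0 : Int)) := by
    intro j hj hnz
    exfalso; apply hnz
    rw [List.getD_eq_getElem?_getD, List.getElem?_replicate]
    split_ifs <;> rfl
  have main : ∀ t : Nat, 2 ≤ t → t ≤ L →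
      pvGood ((PySem.List.pyRange 2 (t : Int) 1).foldl (fun spf p =>
        if PySem.List.pyGetD spf p 0 = 0 then
          (PySem.List.pyRange p (L : Int) p).foldl (fun spf m =>
              if PySem.List.pyGetD spf m 0 = 0 then PySem.List.pySetD spf m p else spf) spf
        else spf) (List.replicate L 0)) ∧
      ((PySem.List.pyRange 2 (t : Int) 1).foldl (fun spf p =>
        if PySem.List.pyGetD spf p 0 = 0 then
          (PySem.List.pyRange p (L : Int) p).foldl (fun spf m =>
              if PySem.List.pyGetD spf m 0 = 0 then PySem.List.pySetD spf m p else spf) spf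
        else spf) (List.replicate L 0)).length = L ∧
      ∀ j : Nat, 2 ≤ j → j < t →
        ((PySem.List.pyRange 2 (t : Int) 1).foldl (fun spf p =>
        if PySem.List.pyGetD spf p 0 = 0 then
          (PySem.List.pyRange p (L : Int) p).foldl (fun spf m =>
              if PySem.List.pyGetD spf m 0 = 0 then PySem.List.pySetD spf m p else spf) spf
        else spf) (List.replicate L 0)).getD j 0 ≠ 0 := by
    intro t
    induction t with
    | zero => omega
    | succ s ih =>
        intro _ hsL
        rcases Nat.lt_or_ge s 2 with hs | hs
        · -- s + 1 = 2
          have hs1 : s = 1 := by omega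
          subst hs1
          rw [show ((2 : Nat) : Int) = 2 by norm_num, PySem.List.pyRange_one_eq_nil le_rfl]
          exact ⟨hG0, by simp, by intro j h1 h2; omega⟩
        · have hcast : ((s + 1 : Nat) : Int) = (s : Int) + 1 := by push_cast; ring
          obtain ⟨pG, plen, pfill⟩ := ih hs (by omega)
          rw [hcast, PySem.List.pyRange_one_succ_right (by exact_mod_cast hs : (2:Int) ≤ (s:Int)),
            List.foldl_append, List.foldl_cons, List.foldl_nil]
          set P := (PySem.List.pyRange 2 (s : Int) 1).foldl (fun spf p =>
            if PySem.List.pyGetD spf p 0 = 0 then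
              (PySem.List.pyRange p (L : Int) p).foldl (fun spf m =>
                  if PySem.List.pyGetD spf m 0 = 0 then PySem.List.pySetD spf m p else spf) spf
            else spf) (List.replicate L 0) with hP
          have hmem : ∀ m ∈ PySem.List.pyRange (s : Int) (L : Int) (s : Int),
              (s : Int) ∣ m ∧ (s : Int) ≤ m ∧ m < (L : Int) := by
            intro m hm
            rw [PySem.List.mem_pyRange_iff_of_pos (by exact_mod_cast (by omega : 0 < s))] at hm
            obtain ⟨h1, h2, h3⟩ := hm
            refine ⟨?_, h1, h2⟩
            simpa using (dvd_add h3 (dvd_refl (s : Int)))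
          have hps : (2 : Int) ≤ (s : Int) := by exact_mod_cast hs
          split_ifs with h0
          · obtain ⟨iG, ilen, inz, iself⟩ := sieve_inner (s : Int) (L : Int) hps _ P hmem pG
            refine ⟨iG, by omega, ?_⟩
            intro j hj2 hjs1
            rcases Nat.lt_or_ge j s with hjs | hjs
            · exact inz j (pfill j hj2 hjs)
            · have hjeq : j = s := by omega
              have hsmem : (s : Int) ∈ PySem.List.pyRange (s : Int) (L : Int) (s : Int) := by
                rw [PySem.List.mem_pyRange_iff_of_pos (by exact_mod_cast (by omega : 0 < s))]
                exact ⟨le_rfl, by exact_mod_cast (by omega : s < L), by simp⟩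
              have hfin := iself (s : Int) hsmem (by rw [plen]; simpa using (by omega : s < L))
              rw [hjeq]
              simpa using hfin
          · refine ⟨pG, plen, ?_⟩
            intro j hj2 hjs1
            rcases Nat.lt_or_ge j s with hjs | hjs
            · exact pfill j hj2 hjs
            · have hjeq : j = s := by omega
              rw [PySem.List.pyGetD_of_nonneg _ _ (by positivity)] at h0
              rw [hjeq]
              simpa using h0
  rcases Nat.lt_or_ge L 3 with hL | hL
  · rw [PySem.List.pyRange_one_eq_nil (by exact_mod_cast (by omega : L ≤ 2))]
    exact ⟨by simp, by intro j h1 h2; omega⟩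
  · obtain ⟨G, len, fill⟩ := main L (by omega) le_rfl
    refine ⟨len, ?_⟩
    intro j h1 h2
    exact G j (by omega) (fill j h1 h2)

lemma ipow_ok (r : Int) (hr : 3 ≤ r) (L : Nat) (S : List Int)
    (hS : ∀ j : Nat, 2 ≤ j → j < L →
      2 ≤ S.getD j 0 ∧ S.getD j 0 ∣ (j : Int) ∧ S.getD j 0 ≤ (j : Int)) :
    ∀ t : Nat, 2 ≤ t → t ≤ L →
    ((PySem.List.pyRange 2 (t : Int) 1).foldl (fun ipow i =>
        let d := PySem.List.pyGetD S i 0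
        PySem.List.pySetD ipow i
          (if d = i then pvPowMod i (r - 2).toNat r
           else PySem.Int.mod (PySem.List.pyGetD ipow d 0 *
                  PySem.List.pyGetD ipow (PySem.Int.floordiv i d) 0) r))
      (if ((L : Nat) : Int) > 1 then PySem.List.pySetD (List.replicate L 0) 1 1
       else List.replicate L 0)).length = L ∧
    ∀ j : Nat, 1 ≤ j → j < t →
    ((PySem.List.pyRange 2 (t : Int) 1).foldl (fun ipow i =>
        let d := PySem.List.pyGetD S i 0
        PySem.List.pySetD ipow i
          (if d = i then pvPowMod i (r - 2).toNat r
           else PySem.Int.mod (PySem.List.pyGetD ipow d 0 *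
                  PySem.List.pyGetD ipow (PySem.Int.floordiv i d) 0) r))
      (if ((L : Nat) : Int) > 1 then PySem.List.pySetD (List.replicate L 0) 1 1
       else List.replicate L 0)).getD j 0 = (j : Int) ^ (r - 2).toNat % r := by
  intro t
  induction t with
  | zero => omega
  | succ s ih =>
      intro _ hsL
      rcases Nat.lt_or_ge s 2 with hs | hs
      · have hs1 : s = 1 := by omega
        subst hs1
        rw [show ((2 : Nat) : Int) = 2 by norm_num, PySem.List.pyRange_one_eq_nil le_rfl]
        have hL2 : (1 : Int) < (L : Int) := by exact_mod_cast (by omega : 1 < L)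
        rw [if_pos hL2]
        constructor
        · simp [PySem.List.length_pySetD]
        · intro j h1 h2
          have hj1 : j = 1 := by omega
          subst hj1
          rw [PySem.List.pySetD_of_nonneg _ _ (by norm_num : (0:Int) ≤ 1)]
          rw [show Int.toNat 1 = 1 from rfl, List.foldl_nil, pv_getD_set,
            if_pos ⟨rfl, by simpa using (by omega : 1 < L)⟩]
          rw [Nat.cast_one, one_pow, Int.emod_eq_of_lt (by norm_num) (by omega)]
      · have hcast : ((s + 1 : Nat) : Int) = (s : Int) + 1 := by push_cast; ring
        obtain ⟨plen, pval⟩ := ih hs (by omega)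
        rw [hcast, PySem.List.pyRange_one_succ_right (by exact_mod_cast hs : (2:Int) ≤ (s:Int)),
          List.foldl_append]
        simp only [List.foldl_cons, List.foldl_nil]
        set I := (PySem.List.pyRange 2 (s : Int) 1).foldl (fun ipow i =>
            let d := PySem.List.pyGetD S i 0
            PySem.List.pySetD ipow i
              (if d = i then pvPowMod i (r - 2).toNat r
               else PySem.Int.mod (PySem.List.pyGetD ipow d 0 *
                      PySem.List.pyGetD ipow (PySem.Int.floordiv i d) 0) r))
          (if ((L : Nat) : Int) > 1 then PySem.List.pySetD (List.replicate L 0) 1 1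
           else List.replicate L 0) with hI
        obtain ⟨hd2, hddvd, hdle⟩ := hS s hs (by omega)
        set d := S.getD s 0 with hd
        have hgd : PySem.List.pyGetD S (s : Int) 0 = d := by
          rw [PySem.List.pyGetD_of_nonneg _ _ (by positivity), Int.toNat_natCast]
        have hv : (if PySem.List.pyGetD S (s:Int) 0 = (s:Int) then pvPowMod (s:Int) (r - 2).toNat r
           else PySem.Int.mod (PySem.List.pyGetD I (PySem.List.pyGetD S (s:Int) 0) 0 *
                  PySem.List.pyGetD I (PySem.Int.floordiv (s:Int) (PySem.List.pyGetD S (s:Int) 0)) 0) r)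
            = (s : Int) ^ (r - 2).toNat % r := by
          rw [hgd]
          split_ifs with hds
          · rw [pvPowMod_eq_pow _ _ _ (by omega)]
          · have hdlt : d < (s : Int) := lt_of_le_of_ne hdle hds
            have hq : PySem.Int.floordiv (s : Int) d = (s : Int) / d := by
              rw [PySem.Int.floordiv, Int.fdiv_eq_ediv, if_pos (Or.inl (by omega)), sub_zero]
            set q : Int := (s : Int) / d with hqdef
            have hdq : d * q = (s : Int) := by
              rw [hqdef, mul_comm]; exact Int.ediv_mul_cancel hddvd
            have hq1 : 1 ≤ q := by nlinarith [hs]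
            have hqlt : q < (s : Int) := by nlinarith
            have hvd : PySem.List.pyGetD I d 0 = d ^ (r - 2).toNat % r := by
              rw [PySem.List.pyGetD_of_nonneg _ _ (by omega),
                pval d.toNat (by omega) (by omega)]
              rw [Int.toNat_of_nonneg (by omega)]
            have hvq : PySem.List.pyGetD I q 0 = q ^ (r - 2).toNat % r := by
              rw [PySem.List.pyGetD_of_nonneg _ _ (by omega),
                pval q.toNat (by omega) (by omega)]
              rw [Int.toNat_of_nonneg (by omega)]
            rw [hq, hvd, hvq, pv_mod_pos _ _ (by omega), ← Int.mul_emod, ← mul_pow, hdq]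
        rw [hv]
        rw [PySem.List.pySetD_of_nonneg _ _ (by positivity), Int.toNat_natCast]
        constructor
        · simp [plen]
        · intro j h1 hj
          rw [pv_getD_set]
          rcases Nat.lt_or_ge j s with hjs | hjs
          · rw [if_neg (by omega), pval j h1 hjs]
          · have : j = s := by omega
            subst this
            rw [if_pos ⟨rfl, by omega⟩]

lemma B_fold (r : Int) (hr : 3 ≤ r) (L : Nat) (I : List Int)
    (hI : ∀ j : Nat, 1 ≤ j → j < L → I.getD j 0 = (j : Int) ^ (r - 2).toNat % r) :
    ∀ t, 1 ≤ t → t ≤ L →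
    (PySem.List.pyRange 1 (t : Int) 1).foldl
        (fun (st : (List Int × List Int) × Int × Int) i =>
          let f := PySem.Int.mod (st.2.1 * i) r
          let g := PySem.Int.mod (st.2.2 * PySem.List.pyGetD I i 0) r
          ((st.1.1 ++ [f], st.1.2 ++ [g]), (f, g))) (([1], [1]), (1, 1))
    = (((List.range t).map (pvF r), (List.range t).map (pvGb r)),
       (pvF r (t - 1), pvGb r (t - 1))) := by
  intro t
  induction t with
  | zero => omega
  | succ s ih =>
      intro _ hsL
      rcases Nat.eq_zero_or_pos s with hs | hs
      · subst hs
        rw [show ((1 : Nat) : Int) = 1 by norm_num, PySem.List.pyRange_one_eq_nil le_rfl]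
        simp [pvF, pvGb]
      · have hcast : ((s + 1 : Nat) : Int) = (s : Int) + 1 := by push_cast; ring
        rw [hcast, PySem.List.pyRange_one_succ_right (by exact_mod_cast hs : (1:Int) ≤ (s:Int)),
          List.foldl_append, ih hs (by omega)]
        simp only [List.foldl_cons, List.foldl_nil]
        have hf : PySem.Int.mod (pvF r (s - 1) * (s : Int)) r = pvF r s := by
          conv_rhs => rw [show s = (s - 1) + 1 by omega]
          show _ = PySem.Int.mod (pvF r (s - 1) * (((s - 1 : Nat) : Int) + 1)) r
          congr 2
          omega
        have hg : PySem.Int.mod (pvGb r (s - 1) * PySem.List.pyGetD I (s : Int) 0) r = pvGb r s := by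
          rw [PySem.List.pyGetD_of_nonneg _ _ (by positivity), Int.toNat_natCast,
            hI s hs (by omega)]
          conv_rhs => rw [show s = (s - 1) + 1 by omega]
          show _ = PySem.Int.mod (pvGb r (s - 1) * PySem.Int.mod ((((s - 1 : Nat) : Int) + 1) ^ (r - 2).toNat) r) r
          rw [show (((s - 1 : Nat) : Int) + 1) = (s : Int) by omega]
          simp [pv_mod_pos _ _ (by omega : (0:Int) < r)]
        rw [hf, hg]
        simp [List.range_succ]

-- ===== VERDICT (by name: the statement is the Claim_ definition above) =====
theorem fermat_array_spec : Claim_equal_fermat_array := by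
  unfold Claim_equal_fermat_array Spec_fermat_array Pre_fermat_array
  intro n k r _ hpre
  by_cases hc : k ≥ r ∨ r < 3
  · unfold fermat_array fermat_array_alt
    rw [if_pos hc, if_pos hc]
  · have hr : 3 ≤ r := by
      rcases not_or.mp hc with ⟨h1, h2⟩; omega
    have hm : 1 ≤ max n k + 3 := by
      rcases hpre with h | h
      · exact absurd h hc
      · exact h
    set L : Nat := (max n k + 3).toNat with hLdef
    have harL : max n k + 3 = (L : Int) := (Int.toNat_of_nonneg (by omega)).symm
    have hL1 : 1 ≤ L := by omega
    have hfun : pvIa r = pvGb r := funext (pvIa_eq_pvGb r hr)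
    have hA : fermat_array n k r
        = (some ((List.range L).map (pvF r)), some ((List.range L).map (pvIa r))) := by
      unfold fermat_array
      rw [if_neg hc]
      simp only [harL, Int.toNat_natCast]
      rw [A_fold r hr L hL1 L hL1 le_rfl]
      simp
    have hB : fermat_array_alt n k r
        = (some ((List.range L).map (pvF r)), some ((List.range L).map (pvGb r))) := by
      unfold fermat_array_alt
      rw [if_neg hc]
      simp only [harL, Int.toNat_natCast]
      obtain ⟨slen, sprop⟩ := sieve_ok L
      have hI : ∀ j : Nat, 1 ≤ j → j < L →
          ((PySem.List.pyRange 2 (L : Int) 1).foldl (fun ipow i =>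
              let d := PySem.List.pyGetD (
                (PySem.List.pyRange 2 (L : Int) 1).foldl (fun spf p =>
                  if PySem.List.pyGetD spf p 0 = 0 then
                    (PySem.List.pyRange p (L : Int) p).foldl (fun spf m =>
                        if PySem.List.pyGetD spf m 0 = 0 then PySem.List.pySetD spf m p else spf) spf
                  else spf) (List.replicate L 0)) i 0
              PySem.List.pySetD ipow i
                (if d = i then pvPowMod i (r - 2).toNat r
                 else PySem.Int.mod (PySem.List.pyGetD ipow d 0 *
                        PySem.List.pyGetD ipow (PySem.Int.floordiv i d) 0) r))
            (if ((L : Nat) : Int) > 1 then PySem.List.pySetD (List.replicate L 0) 1 1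
             else List.replicate L 0)).getD j 0 = (j : Int) ^ (r - 2).toNat % r := by
        rcases Nat.lt_or_ge L 2 with hL2 | hL2
        · intro j h1 h2; omega
        · exact (ipow_ok r hr L _ sprop L hL2 le_rfl).2
      rw [B_fold r hr L _ hI L hL1 le_rfl]
    rw [hA, hB, hfun]
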